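-- pv_equiv track=rewrite | github.com/Nero7991/devlm | bootstrap.py | create_git_patch
-- ===== SOURCE A (Python) =====
-- def create_git_patch(file_path, changes):
--     patch_lines = [
--         f"diff --git a/{file_path} b/{file_path}",
--         f"--- a/{file_path}",
--         f"+++ b/{file_path}"
--     ]
--     hunk_lines = []
--     current_line = 1
--     hunk_start = None
--     hunk_old_lines = 0
--     hunk_new_lines = 0
--
--     changes_list = sorted([c for c in changes.split('\n') if c.strip()], key=lambda x: int(x.split(':')[0].lstrip('+-')))
--
--     for change in changes_list:
--         if change.startswith('+'):
--             line_num, content = change[1:].split(':', 1)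
--             line_num = int(line_num)
--             if hunk_start is None:
--                 hunk_start = max(1, line_num)
--             hunk_lines.append(f"+{content}")
--             hunk_new_lines += 1
--         elif change.startswith('-'):
--             line_num = int(change[1:])
--             if hunk_start is None:
--                 hunk_start = max(1, line_num)
--             hunk_lines.append("-")
--             hunk_old_lines += 1
--         else:
--             line_num, content = change.split(':', 1)
--             line_num = int(line_num)
--             if hunk_start is None:
--                 hunk_start = max(1, line_num)
--             hunk_lines.append(f"-{content}")
--             hunk_lines.append(f"+{content}")
--             hunk_old_lines += 1
--             hunk_new_lines += 1
--
--         if hunk_start is not None and (len(hunk_lines) > 0 or line_num > current_line):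
--             patch_lines.append(f"@@ -{hunk_start},{hunk_old_lines} +{hunk_start},{hunk_new_lines} @@")
--             patch_lines.extend(hunk_lines)
--             hunk_lines = []
--             hunk_start = None
--             hunk_old_lines = 0
--             hunk_new_lines = 0
--
--         current_line = line_num
--
--     if hunk_lines:
--         patch_lines.append(f"@@ -{hunk_start},{hunk_old_lines} +{hunk_start},{hunk_new_lines} @@")
--         patch_lines.extend(hunk_lines)
--
--     return '\n'.join(patch_lines) + '\n'  # Add a newline at the end of the patch
-- ===== SOURCE B (Python) =====
-- def create_git_patch(file_path, changes):
--     header = [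
--         f"diff --git a/{file_path} b/{file_path}",
--         f"--- a/{file_path}",
--         f"+++ b/{file_path}"
--     ]
--     changes_list = sorted([c for c in changes.split('\n') if c.strip()],
--                           key=lambda x: int(x.split(':')[0].lstrip('+-')))
--
--     def hunk(change):
--         if change.startswith('+'):
--             num, content = change[1:].split(':', 1)
--             start = max(1, int(num))
--             return [f"@@ -{start},0 +{start},1 @@", f"+{content}"]
--         elif change.startswith('-'):
--             start = max(1, int(change[1:]))
--             return [f"@@ -{start},1 +{start},0 @@", "-"]
--         else:
--             num, content = change.split(':', 1)
--             start = max(1, int(num))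
--             return [f"@@ -{start},1 +{start},1 @@", f"-{content}", f"+{content}"]
--
--     body = [line for change in changes_list for line in hunk(change)]
--     return '\n'.join(header + body) + '\n'
-- ===== Notes on version B (the rewrite author's own statement) =====
-- stated objective: simpler
-- what changed: A's deferred hunk state machine (hunk_lines/hunk_start/old/new counters with a flush condition that in fact fires on every iteration) is replaced by direct per-change hunk emission: each sorted change maps to its header plus body lines, concatenated by a comprehension.
import Mathlib
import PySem

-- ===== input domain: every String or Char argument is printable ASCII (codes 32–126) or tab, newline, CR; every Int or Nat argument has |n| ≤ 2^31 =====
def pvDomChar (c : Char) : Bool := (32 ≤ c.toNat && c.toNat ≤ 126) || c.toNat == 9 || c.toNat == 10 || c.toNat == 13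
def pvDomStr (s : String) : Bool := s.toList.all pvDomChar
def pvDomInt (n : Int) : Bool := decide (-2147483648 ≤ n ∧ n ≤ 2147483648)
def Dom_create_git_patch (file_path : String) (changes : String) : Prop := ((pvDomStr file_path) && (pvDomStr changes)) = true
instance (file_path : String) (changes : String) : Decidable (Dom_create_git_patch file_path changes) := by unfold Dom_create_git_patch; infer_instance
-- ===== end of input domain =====

-- B replaces A's deferred hunk state machine (which in fact flushes on every change) by
-- direct per-change hunk emission via flatMap; objective: simpler, same cost.

-- shared helpers: both Pythons contain these verbatim expressions
-- sort key: int(x.split(':')[0].lstrip('+-'))  (getD 0 is unreachable under Pre_)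
def pvKeyOf (x : String) : Int :=
  (PySem.Int.ofStr? (String.ofList
    ((((PySem.Str.split? x ":").getD []).headI).toList.dropWhile (fun c => c == '+' || c == '-')))).getD 0

-- sorted([c for c in changes.split('\n') if c.strip()], key=…)
def pvChangesList (changes : String) : List String :=
  PySem.List.sorted
    (((PySem.Str.split? changes "\n").getD []).filter (fun c => !(PySem.Str.strip c == "")))
    pvKeyOf false

-- s.split(':', 1) unpacked into two names (("","") unreachable under Pre_)
def pvSplit1D (s : String) : String × String :=
  match PySem.Str.splitMax? s ":" 1 with
  | some [a, b] => (a, b)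
  | _ => ("", "")

-- int(s)  (getD 0 unreachable under Pre_)
def pvIntD (s : String) : Int := (PySem.Int.ofStr? s).getD 0

-- f"@@ -{s},{old} +{s},{new} @@"
def pvHdr (s old new : Int) : String :=
  "@@ -" ++ PySem.Int.toStr s ++ "," ++ PySem.Int.toStr old ++ " +" ++
    PySem.Int.toStr s ++ "," ++ PySem.Int.toStr new ++ " @@"

-- ===== PORT A =====
-- the f-string would print a None hunk_start as "None" (unreachable: hunk_lines ≠ [] forces some)
def pvOptIntStr : Option Int → String
  | some v => PySem.Int.toStr v
  | none => "None"

def pvHdrOA (s : Option Int) (old new : Int) : String :=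
  "@@ -" ++ pvOptIntStr s ++ "," ++ PySem.Int.toStr old ++ " +" ++
    pvOptIntStr s ++ "," ++ PySem.Int.toStr new ++ " @@"

-- one iteration of A's loop over (patch_lines, hunk_lines, current_line, hunk_start, hunk_old_lines, hunk_new_lines)
def pvStepA (st : List String × List String × Int × Option Int × Int × Int) (change : String) :
    List String × List String × Int × Option Int × Int × Int :=
  match st with
  | (patch, hl, cur, hs, ho, hn) =>
    match
      (if PySem.Str.startswith change "+" then
        let p := pvSplit1D (PySem.Str.slice change (some 1) none)
        let ln := pvIntD p.1
        (ln, hl ++ ["+" ++ p.2], some (hs.getD (max 1 ln)), ho, hn + 1)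
      else if PySem.Str.startswith change "-" then
        let ln := pvIntD (PySem.Str.slice change (some 1) none)
        (ln, hl ++ ["-"], some (hs.getD (max 1 ln)), ho + 1, hn)
      else
        let p := pvSplit1D change
        let ln := pvIntD p.1
        (ln, hl ++ ["-" ++ p.2, "+" ++ p.2], some (hs.getD (max 1 ln)), ho + 1, hn + 1) :
        Int × List String × Option Int × Int × Int) with
    | (ln, hl', hs', ho', hn') =>
      match hs' with
      | some s =>
        if hl'.length > 0 ∨ ln > cur then
          (patch ++ (pvHdr s ho' hn' :: hl'), [], ln, none, 0, 0)
        else (patch, hl', ln, some s, ho', hn')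
      | none => (patch, hl', ln, none, ho', hn')

def create_git_patch (file_path : String) (changes : String) : String :=
  let patch_lines : List String :=
    ["diff --git a/" ++ file_path ++ " b/" ++ file_path,
     "--- a/" ++ file_path, "+++ b/" ++ file_path]
  match (pvChangesList changes).foldl pvStepA (patch_lines, [], 1, none, 0, 0) with
  | (patch, hl, _, hs, ho, hn) =>
    let patch := if hl.length > 0 then patch ++ (pvHdrOA hs ho hn :: hl) else patch
    PySem.Str.join "\n" patch ++ "\n"

-- ===== PORT B =====
-- the hunk a single change contributes: header line plus body
def pvHunkOf (change : String) : List String :=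
  if PySem.Str.startswith change "+" then
    let p := pvSplit1D (PySem.Str.slice change (some 1) none)
    let start := max 1 (pvIntD p.1)
    [pvHdr start 0 1, "+" ++ p.2]
  else if PySem.Str.startswith change "-" then
    let start := max 1 (pvIntD (PySem.Str.slice change (some 1) none))
    [pvHdr start 1 0, "-"]
  else
    let p := pvSplit1D change
    let start := max 1 (pvIntD p.1)
    [pvHdr start 1 1, "-" ++ p.2, "+" ++ p.2]

def create_git_patch_alt (file_path : String) (changes : String) : String :=
  let header : List String :=
    ["diff --git a/" ++ file_path ++ " b/" ++ file_path,
     "--- a/" ++ file_path, "+++ b/" ++ file_path]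
  PySem.Str.join "\n" (header ++ (pvChangesList changes).flatMap pvHunkOf) ++ "\n"

-- ===== PRECONDITION & SPEC =====
-- Pre_ admits exactly the inputs on which Python A returns: every non-blank change line must
-- parse — the sort key int(x.split(':')[0].lstrip('+-')) succeeds, and the branch for the line
-- ('+' and context lines contain ':' with an int before it, '-' lines are int after the '-')
-- succeeds; elsewhere A raises ValueError.
def pvLineOK (c : String) : Bool :=
  (PySem.Int.ofStr? (String.ofList
      ((((PySem.Str.split? c ":").getD []).headI).toList.dropWhile (fun ch => ch == '+' || ch == '-')))).isSome &&
  (if PySem.Str.startswith c "+" then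
     match PySem.Str.splitMax? (PySem.Str.slice c (some 1) none) ":" 1 with
     | some [a, _] => (PySem.Int.ofStr? a).isSome
     | _ => false
   else if PySem.Str.startswith c "-" then
     (PySem.Int.ofStr? (PySem.Str.slice c (some 1) none)).isSome
   else
     match PySem.Str.splitMax? c ":" 1 with
     | some [a, _] => (PySem.Int.ofStr? a).isSome
     | _ => false)

def Pre_create_git_patch (file_path : String) (changes : String) : Prop :=
  ((((PySem.Str.split? changes "\n").getD []).filter (fun c => !(PySem.Str.strip c == ""))).all pvLineOK) = true

instance (file_path : String) (changes : String) : Decidable (Pre_create_git_patch file_path changes) := by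
  unfold Pre_create_git_patch; infer_instance

def pvWitness_create_git_patch : String × String := ("a.py", "+1:hello\n-2\n3:ctx")

def Spec_create_git_patch (file_path : String) (changes : String) (out : String) : Prop := out = create_git_patch_alt file_path changes
instance (file_path : String) (changes : String) (out : String) : Decidable (Spec_create_git_patch file_path changes out) := by unfold Spec_create_git_patch; infer_instance

-- ===== CLAIM (what is proved, stated in full; the proofs are below) =====
def Claim_equal_create_git_patch : Prop := ∀ (file_path : String) (changes : String), Dom_create_git_patch file_path changes → Pre_create_git_patch file_path changes → Spec_create_git_patch file_path changes (create_git_patch file_path changes)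

-- ===== LEMMAS AND PROOFS =====

-- the line number A's iteration ends with (its current_line update)
def pvLnOf (c : String) : Int :=
  if PySem.Str.startswith c "+" then pvIntD (pvSplit1D (PySem.Str.slice c (some 1) none)).1
  else if PySem.Str.startswith c "-" then pvIntD (PySem.Str.slice c (some 1) none)
  else pvIntD (pvSplit1D c).1

-- from a flushed state, one iteration of A emits exactly B's hunk and flushes again:
-- hunk_lines is non-empty after every branch, so the in-loop flush always fires
lemma pvStepA_flushed (p : List String) (cur : Int) (c : String) :
    pvStepA (p, [], cur, none, 0, 0) c = (p ++ pvHunkOf c, [], pvLnOf c, none, 0, 0) := by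
  by_cases h1 : PySem.Chars.startswith c.toList ['+'] = true
  · simp [pvStepA, pvHunkOf, pvLnOf, h1]
  · by_cases h2 : PySem.Chars.startswith c.toList ['-'] = true <;>
      simp [pvStepA, pvHunkOf, pvLnOf, h1, h2]

-- A's whole loop from a flushed state appends the concatenation of B's hunks
lemma pvLoopA (l : List String) (p : List String) (cur : Int) :
    l.foldl pvStepA (p, [], cur, none, 0, 0) =
      (p ++ l.flatMap pvHunkOf, [], l.foldl (fun _ c => pvLnOf c) cur, none, 0, 0) := by
  induction l generalizing p cur with
  | nil => simp
  | cons c t ih =>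
      simp only [List.foldl_cons, pvStepA_flushed, List.flatMap_cons]
      rw [ih]
      simp [List.append_assoc]

-- ===== VERDICT (by name: the statement is the Claim_ definition above) =====
theorem create_git_patch_spec : Claim_equal_create_git_patch := by
  intro file_path changes _ _
  unfold Spec_create_git_patch create_git_patch create_git_patch_alt
  simp only [pvLoopA]
  simp
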